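-- pv_equiv track=rewrite | github.com/ValeriaBelyaeva/algorithms-and-data-structures | lab5/task3/src/network_packets.py | simulate_network
-- ===== SOURCE A (Python) =====
-- def simulate_network(S, packets):
--     """
--     Моделирует обработку пакетов:
--       - Размер буфера = S
--       - Если буфер полон при приходе пакета, пакет отбрасывается (res=-1)
--       - Иначе помещаем в очередь (finish_time)
--       - Для каждого пакета вычислить время начала обработки или -1
--     Возвращает список времен начала обработки в том же порядке.
--     """
--     # finish_time будет хранить время, когда завершится пакет
--     # который в данный момент в буфере.
--     from collections import deque
--     finish_times = deque()
--     results = [-1]*len(packets)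
--
--     # Время окончания обработки последнего пакета в очереди
--     # (будем хранить для каждого пакета)
--     for i, (arrival, processing) in enumerate(packets):
--         # Удаляем из начала finish_times пакеты, которые завершатся раньше arrival
--         while finish_times and finish_times[0] <= arrival:
--             finish_times.popleft()
--
--         # Если буфер полон, пакет отбрасывается
--         if len(finish_times) == S:
--             results[i] = -1
--             continue
--
--         # Если буфер пуст, начинаем обрабатывать пакет в момент arrival
--         if not finish_times:
--             start = arrival
--         else:
--             # Иначе начинаем после последнего в finish_times
--             start = finish_times[-1]
--
--         results[i] = start
--         finish_times.append(start + processing)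
--
--     return results
-- ===== SOURCE B (Python) =====
-- def simulate_network(S, packets):
--     # Append-only finish-time array + monotone head pointer; eviction by binary search
--     # over the sorted active region finish[head:].
--     finish = []
--     head = 0
--     results = []
--     for arrival, processing in packets:
--         # first index in finish[head:] whose finish time is > arrival
--         lo, hi = head, len(finish)
--         while lo < hi:
--             mid = (lo + hi) // 2
--             if finish[mid] <= arrival:
--                 lo = mid + 1
--             else:
--                 hi = mid
--         head = lo
--         if len(finish) - head == S:
--             results.append(-1)
--         else:
--             start = arrival if head == len(finish) else finish[-1]
--             results.append(start)
--             finish.append(start + processing)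
--     return results
-- ===== Notes on version B (the rewrite author's own statement) =====
-- stated objective: alternative
-- what changed: Replaces the destructive deque with its pop-front eviction while-loop by an append-only array of finish times plus a monotone head pointer advanced by binary search; occupancy and the last finish time are read off the array instead of a mutating queue. Pre_ excludes packets with a negative processing time (outside the natural domain of a packet simulation), since there the finish-time buffer is no longer sorted and the binary-search eviction need not match the deque's front-only pop.
-- outside the precondition, e.g. on simulate_network(5, [(0, 5), (0, -4), (4, 1)]): A returns [0, 5, 1], B returns [0, 5, 4]
import Mathlib
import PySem

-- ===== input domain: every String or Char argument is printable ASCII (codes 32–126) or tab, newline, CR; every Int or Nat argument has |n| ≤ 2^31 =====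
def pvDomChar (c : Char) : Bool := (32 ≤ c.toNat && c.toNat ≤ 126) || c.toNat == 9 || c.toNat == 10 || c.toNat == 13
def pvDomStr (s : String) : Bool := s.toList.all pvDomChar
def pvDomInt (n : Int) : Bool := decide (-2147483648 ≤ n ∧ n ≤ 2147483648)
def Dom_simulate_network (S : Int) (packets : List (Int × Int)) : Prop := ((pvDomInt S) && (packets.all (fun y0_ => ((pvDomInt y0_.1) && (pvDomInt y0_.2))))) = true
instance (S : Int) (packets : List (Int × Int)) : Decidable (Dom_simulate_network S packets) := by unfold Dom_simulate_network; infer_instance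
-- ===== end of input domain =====

-- B replaces A's destructive deque (pop-front eviction loop) by an append-only finish-time
-- array with a monotone head pointer advanced by binary search (alternative decomposition).


-- ===== PORT A =====
-- the 'while finish_times and finish_times[0] <= arrival: finish_times.popleft()' loop
def pvEvict (arrival : Int) : List Int → List Int
  | [] => []
  | f :: rest => if f ≤ arrival then pvEvict arrival rest else f :: rest

-- the for-loop over enumerate(packets), carrying (finish_times, results, i)
def pvGoA (S : Int) (finish results : List Int) (i : Nat) : List (Int × Int) → List Int
  | [] => results
  | (arrival, processing) :: rest =>
    let finish' := pvEvict arrival finish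
    if PySem.List.len finish' = S then
      pvGoA S finish' (PySem.List.pySetD results (i : Int) (-1)) (i + 1) rest
    else
      -- finish_times[-1]; the branch guarantees the deque is nonempty
      let start := if finish' = [] then arrival else PySem.List.pyGetD finish' (-1) 0
      pvGoA S (finish' ++ [start + processing]) (PySem.List.pySetD results (i : Int) start) (i + 1) rest

def simulate_network (S : Int) (packets : List (Int × Int)) : List Int :=
  pvGoA S [] (List.replicate packets.length (-1)) 0 packets

-- ===== PORT B =====
-- Source B's hand-written binary-search loop: while lo < hi: mid = (lo+hi)//2 …
def pvBsr (finish : List Int) (a : Int) (lo hi : Nat) : Nat :=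
  if h : lo < hi then
    let mid := (lo + hi) / 2
    if finish.getD mid 0 ≤ a then pvBsr finish a (mid + 1) hi
    else pvBsr finish a lo mid
  else lo
termination_by hi - lo
decreasing_by all_goals omega

-- Source B's for-loop, carrying (finish, head)
def pvGoB (S : Int) (finish : List Int) (head : Nat) : List (Int × Int) → List Int
  | [] => []
  | (arrival, processing) :: rest =>
    let head' := pvBsr finish arrival head finish.length
    if ((finish.length - head' : Nat) : Int) = S then
      (-1) :: pvGoB S finish head' rest
    else
      let start := if head' = finish.length then arrival else PySem.List.pyGetD finish (-1) 0
      start :: pvGoB S (finish ++ [start + processing]) head' rest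

def simulate_network_alt (S : Int) (packets : List (Int × Int)) : List Int :=
  pvGoB S [] 0 packets

-- ===== PRECONDITION & SPEC =====
-- Pre_ restricts to nonnegative processing times — the natural domain of the simulation; with a
-- negative duration the finish-time buffer is unsorted and B's binary-search eviction need not
-- match A's front-only pops (A still returns a value there; see the cite in claim.json).
def Pre_simulate_network (S : Int) (packets : List (Int × Int)) : Prop :=
  ∀ pr ∈ packets, 0 ≤ pr.2
instance (S : Int) (packets : List (Int × Int)) : Decidable (Pre_simulate_network S packets) := by
  unfold Pre_simulate_network; infer_instance
def pvWitness_simulate_network : Int × (List (Int × Int)) := (1, [(0, 2), (1, 3), (5, 1)])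

def Spec_simulate_network (S : Int) (packets : List (Int × Int)) (out : List Int) : Prop := out = simulate_network_alt S packets
instance (S : Int) (packets : List (Int × Int)) (out : List Int) : Decidable (Spec_simulate_network S packets out) := by unfold Spec_simulate_network; infer_instance

-- ===== CLAIM (what is proved, stated in full; the proofs are below) =====
def Claim_equal_simulate_network : Prop := ∀ (S : Int) (packets : List (Int × Int)), Dom_simulate_network S packets → Pre_simulate_network S packets → Spec_simulate_network S packets (simulate_network S packets)

-- ===== LEMMAS AND PROOFS =====

-- A's loop with the results array abstracted away: the pure per-packet output stream.
def pvGoP (S : Int) (finish : List Int) : List (Int × Int) → List Int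
  | [] => []
  | (arrival, processing) :: rest =>
    let finish' := pvEvict arrival finish
    if PySem.List.len finish' = S then
      (-1) :: pvGoP S finish' rest
    else
      let start := if finish' = [] then arrival else PySem.List.pyGetD finish' (-1) 0
      start :: pvGoP S (finish' ++ [start + processing]) rest

theorem pvEvict_eq_dropWhile (a : Int) (l : List Int) :
    pvEvict a l = l.dropWhile (fun f => decide (f ≤ a)) := by
  induction l with
  | nil => rfl
  | cons x xs ih =>
    simp only [pvEvict, List.dropWhile_cons]
    by_cases h : x ≤ a <;> simp [h, ih]

theorem pvDropWhile_eq_drop (a : Int) (l : List Int) (k : Nat) (hk : k ≤ l.length)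
    (hle : ∀ j, (h : j < k) → l.getD j 0 ≤ a)
    (hgt : ∀ (h : k < l.length), a < l.getD k 0) :
    l.dropWhile (fun f => decide (f ≤ a)) = l.drop k := by
  induction l generalizing k with
  | nil => simp
  | cons x xs ih =>
    cases k with
    | zero =>
      have := hgt (by simp)
      simp only [List.getD] at this
      simp only [List.dropWhile_cons]
      have : ¬ (x ≤ a) := by simpa using not_le.mpr this
      simp [this]
    | succ k' =>
      have hx : x ≤ a := by simpa using hle 0 (Nat.succ_pos _)
      simp only [List.dropWhile_cons, hx, decide_true, List.drop_succ_cons]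
      exact ih k' (by simpa using hk)
        (fun j hj => by simpa using hle (j + 1) (by omega))
        (fun h => by simpa using hgt (by simpa using h))

-- monotonicity of a list sorted from `base` on, phrased with getD
theorem pvMonoD (finish : List Int) (base i j : Nat)
    (hs : (finish.drop base).Pairwise (· ≤ ·))
    (hbi : base ≤ i) (hij : i ≤ j) (hj : j < finish.length) :
    finish.getD i 0 ≤ finish.getD j 0 := by
  rcases eq_or_lt_of_le hij with rfl | hlt
  · exact le_refl _
  · have hi' : i - base < (finish.drop base).length := by simp; omega
    have hj' : j - base < (finish.drop base).length := by simp; omega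
    have := (List.pairwise_iff_getElem.mp hs) (i - base) (j - base) hi' hj' (by omega)
    simp only [List.getElem_drop] at this
    rw [List.getD_eq_getElem _ _ (by omega : i < finish.length),
        List.getD_eq_getElem _ _ hj]
    convert this using 2 <;> omega

theorem pvBsr_spec (finish : List Int) (a : Int) (base : Nat)
    (hs : (finish.drop base).Pairwise (· ≤ ·)) :
    ∀ lo hi, base ≤ lo → lo ≤ hi → hi ≤ finish.length →
    (∀ j, base ≤ j → j < lo → finish.getD j 0 ≤ a) →
    (∀ j, hi ≤ j → j < finish.length → a < finish.getD j 0) →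
    base ≤ pvBsr finish a lo hi ∧ pvBsr finish a lo hi ≤ finish.length ∧
    (∀ j, base ≤ j → j < pvBsr finish a lo hi → finish.getD j 0 ≤ a) ∧
    (∀ j, pvBsr finish a lo hi ≤ j → j < finish.length → a < finish.getD j 0) := by
  intro lo hi
  induction lo, hi using pvBsr.induct finish a with
  | case1 lo hi h mid hle ih =>
    intro hblo hlohi hhilen hlow hhigh
    rw [pvBsr, dif_pos h, if_pos (by exact hle)]
    exact ih (by omega) (by omega) hhilen
      (fun j hbj hj => by
        by_cases hjlo : j < lo
        · exact hlow j hbj hjlo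
        · have : finish.getD j 0 ≤ finish.getD mid 0 :=
            pvMonoD finish base j mid hs hbj (by omega) (by omega)
          exact le_trans this hle)
      hhigh
  | case2 lo hi h mid hgt ih =>
    intro hblo hlohi hhilen hlow hhigh
    rw [pvBsr, dif_pos h, if_neg (by exact hgt)]
    exact ih hblo (by omega) (by omega) hlow
      (fun j hj hjlen => by
        have : finish.getD mid 0 ≤ finish.getD j 0 :=
          pvMonoD finish base mid j hs (by omega) hj hjlen
        have := lt_of_not_ge hgt
        omega)
  | case3 lo hi h =>
    intro hblo hlohi hhilen hlow hhigh
    rw [pvBsr, dif_neg h]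
    exact ⟨hblo, by omega, fun j hbj hj => hlow j hbj hj,
      fun j hj hjlen => hhigh j (by omega) hjlen⟩

-- evict on the active (sorted) region = drop to the binary-search point
theorem pvEvict_eq_drop (finish : List Int) (a : Int) (head : Nat)
    (hh : head ≤ finish.length) (hs : (finish.drop head).Pairwise (· ≤ ·)) :
    pvEvict a (finish.drop head) = finish.drop (pvBsr finish a head finish.length) ∧
    head ≤ pvBsr finish a head finish.length ∧
    pvBsr finish a head finish.length ≤ finish.length := by
  obtain ⟨h1, h2, h3, h4⟩ := pvBsr_spec finish a head hs head finish.length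
    (le_refl _) hh (le_refl _) (fun j _ hj => absurd hj (by omega))
    (fun j hj hjlen => absurd hjlen (by omega))
  set r := pvBsr finish a head finish.length with hr
  refine ⟨?_, h1, h2⟩
  rw [pvEvict_eq_dropWhile]
  have := pvDropWhile_eq_drop a (finish.drop head) (r - head)
    (by simp; omega)
    (fun j hj => by
      rw [List.getD_eq_getElem _ _ (by simp; omega)]
      simp only [List.getElem_drop]
      have := h3 (head + j) (by omega) (by omega)
      rwa [List.getD_eq_getElem _ _ (by omega)] at this)
    (fun h => by
      rw [List.getD_eq_getElem _ _ h]
      simp only [List.getElem_drop]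
      have hlen : (finish.drop head).length = finish.length - head := by simp
      have := h4 (head + (r - head)) (by omega) (by omega)
      rwa [List.getD_eq_getElem _ _ (by rw [hlen] at h; omega)] at this)
  rw [this, List.drop_drop]
  congr 1
  omega

theorem pvLast_drop (finish : List Int) (r : Nat) (hne : finish.drop r ≠ []) :
    PySem.List.pyGetD (finish.drop r) (-1) 0 = PySem.List.pyGetD finish (-1) 0 := by
  have hfne : finish ≠ [] := by
    intro h; rw [h] at hne; simp at hne
  rw [PySem.List.pyGetD_neg_one _ 0 hne, PySem.List.pyGetD_neg_one _ 0 hfne]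
  have hr : r < finish.length := by
    by_contra h
    exact hne (List.drop_eq_nil_of_le (by omega))
  rw [List.getLast_eq_getElem, List.getLast_eq_getElem]
  simp only [List.getElem_drop, List.length_drop]
  congr 1
  omega

-- members of a (≤)-sorted list are ≤ its last element
theorem pvLe_getLast (l : List Int) (hs : l.Pairwise (· ≤ ·)) (y : Int) (hy : y ∈ l)
    (hne : l ≠ []) : y ≤ l.getLast hne := by
  induction l with
  | nil => cases hy
  | cons x xs ih =>
    rcases List.mem_cons.mp hy with rfl | hy'
    · cases xs with
      | nil => simp [List.getLast]
      | cons z zs =>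
        have hx : y ≤ (z :: zs).getLast (by simp) := by
          have hmem : (z :: zs).getLast (by simp) ∈ z :: zs := List.getLast_mem _
          exact (List.pairwise_cons.mp hs).1 _ hmem
        simpa [List.getLast_cons] using hx
    · cases xs with
      | nil => cases hy'
      | cons z zs =>
        have := ih (List.pairwise_cons.mp hs).2 hy' (by simp)
        simpa [List.getLast_cons] using this

-- MAIN INVARIANT: A's pure stream on the active region = B's loop
theorem pvMain (S : Int) (ps : List (Int × Int)) :
    ∀ finish head, head ≤ finish.length →
    (finish.drop head).Pairwise (· ≤ ·) →
    (∀ pr ∈ ps, 0 ≤ pr.2) →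
    pvGoP S (finish.drop head) ps = pvGoB S finish head ps := by
  induction ps with
  | nil => intro finish head _ _ _; rfl
  | cons hd rest ih =>
    intro finish head hh hs hpre
    obtain ⟨a, p⟩ := hd
    obtain ⟨heq, hhr, hrl⟩ := pvEvict_eq_drop finish a head hh hs
    set r := pvBsr finish a head finish.length with hrdef
    have hp : 0 ≤ p := hpre (a, p) List.mem_cons_self
    have hpre' : ∀ pr ∈ rest, 0 ≤ pr.2 := fun pr hpr => hpre pr (List.mem_cons_of_mem _ hpr)
    have hsr : (finish.drop r).Pairwise (· ≤ ·) := by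
      have hdd : finish.drop r = (finish.drop head).drop (r - head) := by
        rw [List.drop_drop]; congr 1; omega
      rw [hdd]
      exact hs.sublist (List.drop_sublist _ _)
    have hlen : PySem.List.len (finish.drop r) = ((finish.length - r : Nat) : Int) := by
      simp [PySem.List.len_eq]
    simp only [pvGoP, pvGoB, ← hrdef, heq, hlen]
    by_cases hfull : ((finish.length - r : Nat) : Int) = S
    · simp only [if_pos hfull]
      congr 1
      exact ih finish r hrl hsr hpre'
    · simp only [if_neg hfull]
      have hempty_iff : (finish.drop r = []) ↔ (r = finish.length) := by
        constructor
        · intro h; have := congrArg List.length h; simp at this; omega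
        · intro h; exact List.drop_eq_nil_of_le (by omega)
      have hstart : (if finish.drop r = [] then a else PySem.List.pyGetD (finish.drop r) (-1) 0)
          = (if r = finish.length then a else PySem.List.pyGetD finish (-1) 0) := by
        by_cases he : finish.drop r = []
        · rw [if_pos he, if_pos (hempty_iff.mp he)]
        · rw [if_neg he, if_neg (fun h => he (hempty_iff.mpr h)), pvLast_drop finish r he]
      rw [hstart]
      set start := if r = finish.length then a else PySem.List.pyGetD finish (-1) 0 with hstdef
      congr 1
      have hdrop_app : (finish ++ [start + p]).drop r = finish.drop r ++ [start + p] :=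
        List.drop_append_of_le_length hrl
      have hsr' : ((finish ++ [start + p]).drop r).Pairwise (· ≤ ·) := by
        rw [hdrop_app, List.pairwise_append]
        refine ⟨hsr, by simp, ?_⟩
        intro y hy z hz
        rcases List.mem_singleton.mp hz with rfl
        by_cases he : finish.drop r = []
        · rw [he] at hy; cases hy
        · have hy_last : y ≤ (finish.drop r).getLast he := pvLe_getLast _ hsr y hy he
          have hlast : (finish.drop r).getLast he = start := by
            rw [hstdef, if_neg (fun h => he (hempty_iff.mpr h))]
            rw [← pvLast_drop finish r he, PySem.List.pyGetD_neg_one _ 0 he]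
          rw [hlast] at hy_last
          omega
      have hrec := ih (finish ++ [start + p]) r (by simp; omega) hsr' hpre'
      rw [← hrec, hdrop_app]

-- A with its results array = A's pure stream
theorem pvGoA_eq_take (S : Int) (ps : List (Int × Int)) :
    ∀ finish results (i : Nat), results.length = i + ps.length →
    pvGoA S finish results i ps = results.take i ++ pvGoP S finish ps := by
  induction ps with
  | nil =>
    intro finish results i hlen
    simp only [pvGoA, pvGoP, List.append_nil]
    rw [List.take_of_length_le (by simp at hlen; omega)]
  | cons hd rest ih =>
    intro finish results i hlen
    obtain ⟨a, p⟩ := hd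
    have hi : i < results.length := by simp at hlen; omega
    have hset : ∀ v : Int, PySem.List.pySetD results (i : Int) v = results.set i v := by
      intro v; exact PySem.List.pySetD_natCast ..
    have htake : ∀ v : Int, (results.set i v).take (i + 1) = results.take i ++ [v] := by
      intro v
      rw [List.take_add_one, List.getElem?_set_self hi, List.take_set,
          List.set_eq_of_length_le (by simp)]
      simp
    simp only [pvGoA, pvGoP]
    by_cases hfull : PySem.List.len (pvEvict a finish) = S
    · simp only [if_pos hfull]
      rw [hset, ih _ _ (i + 1) (by simp at hlen ⊢; omega), htake]
      simp
    · simp only [if_neg hfull]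
      rw [hset, ih _ _ (i + 1) (by simp at hlen ⊢; omega), htake]
      simp

-- ===== VERDICT (by name: the statement is the Claim_ definition above) =====
theorem simulate_network_spec : Claim_equal_simulate_network := by
  intro S packets _hdom hpre
  unfold Spec_simulate_network simulate_network simulate_network_alt
  rw [pvGoA_eq_take S packets [] (List.replicate packets.length (-1)) 0 (by simp)]
  simp only [List.take_zero, List.nil_append]
  have := pvMain S packets [] 0 (by simp) (by simp) hpre
  simpa using this
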